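-- pv_equiv track=rewrite | github.com/Raihansatar/Algorithm-Assignment | Cities.py | sentimentValuePath
-- ===== SOURCE A (Python) =====
-- def sentimentValuePath(array):
--     y = [1,2,3,4,5,6,7]
--     x = array[1:]
--
--     # bubble sort... for y using x(Sentimental Value) as a key
--     n = len(x)
--     for i in range(n-1):
--         for j in range(n-i-1):
--             if(x[j]<x[j+1]):
--                 x[j],x[j+1]=x[j+1],x[j]
--                 y[j],y[j+1]=y[j+1],y[j]
--
--     y=[0]+y+[0]
--     return y
-- ===== SOURCE B (Python) =====
-- def sentimentValuePath(array):
--     x = array[1:]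
--     y = [1, 2, 3, 4, 5, 6, 7]
--
--     # insertion sort: order x descending, carrying the city indices in y along
--     for i in range(1, len(x)):
--         key = x[i]
--         idx = y[i]
--         j = i
--         while j > 0 and x[j - 1] < key:
--             x[j] = x[j - 1]
--             y[j] = y[j - 1]
--             j -= 1
--         x[j] = key
--         y[j] = idx
--
--     return [0] + y + [0]
-- ===== Notes on version B (the rewrite author's own statement) =====
-- stated objective: alternative
-- what changed: A's bubble sort (nested passes swapping adjacent out-of-order pairs of the two parallel lists) is replaced by an insertion sort that shifts each value/index pair leftward into an already-sorted prefix; Pre_ excludes arrays longer than 8, where A raises IndexError on the first out-of-range swap (returning only accidentally when the leading values happen to be sorted) and B raises IndexError unconditionally.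
-- outside the precondition, e.g. on sentimentValuePath([9, 8, 7, 6, 5, 4, 3, 2, 1]): A returns [0, 1, 2, 3, 4, 5, 6, 7, 0], B raises IndexError
import Mathlib
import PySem

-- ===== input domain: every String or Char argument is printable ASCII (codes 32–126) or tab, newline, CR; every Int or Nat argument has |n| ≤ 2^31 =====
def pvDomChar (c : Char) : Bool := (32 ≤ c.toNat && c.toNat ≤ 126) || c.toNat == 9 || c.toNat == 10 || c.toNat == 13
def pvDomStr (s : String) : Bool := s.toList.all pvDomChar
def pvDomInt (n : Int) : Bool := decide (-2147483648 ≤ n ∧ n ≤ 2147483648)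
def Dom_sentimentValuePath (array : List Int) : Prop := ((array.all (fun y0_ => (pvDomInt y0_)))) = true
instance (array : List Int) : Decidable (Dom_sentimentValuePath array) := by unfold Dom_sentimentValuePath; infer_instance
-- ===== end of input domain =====

-- B replaces A's bubble sort on the two parallel lists by an insertion sort that shifts each
-- value/index pair leftward into a sorted prefix (objective: alternative algorithm, same cost);
-- the equivalence is about the return value only.

-- ===== PORT A =====
-- x[j],x[j+1] = x[j+1],x[j] : both reads happen before both writes
def pvSwap (j : Nat) (l : List Int) : List Int :=
  (l.set j (l.getD (j+1) 0)).set (j+1) (l.getD j 0)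

-- body of the inner loop: 'if x[j] < x[j+1]: swap x; swap y' (in-range on every admitted input)
def pvStepA (st : List Int × List Int) (j : Nat) : List Int × List Int :=
  if st.1.getD j 0 < st.1.getD (j+1) 0 then (pvSwap j st.1, pvSwap j st.2) else st

def sentimentValuePath (array : List Int) : List Int :=
  let y : List Int := [1,2,3,4,5,6,7]
  let x := PySem.List.slice array (some 1) none       -- array[1:]
  let n := x.length
  -- for i in range(n-1): for j in range(n-i-1): …  (range of a Python int ≥ 0 is List.range)
  let st := (List.range (n-1)).foldl
      (fun st i => (List.range (n - i - 1)).foldl pvStepA st) (x, y)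
  0 :: st.2 ++ [0]                                    -- [0] + y + [0]

-- ===== PORT B =====
-- the 'while j > 0 and x[j-1] < key: x[j]=x[j-1]; y[j]=y[j-1]; j -= 1' loop, by recursion on j
-- (every read/write is in range on every admitted input)
def pvShiftB (key : Int) : Nat → List Int → List Int → Nat × List Int × List Int
  | 0, x, y => (0, x, y)
  | j+1, x, y =>
    if x.getD j 0 < key then
      pvShiftB key j (x.set (j+1) (x.getD j 0)) (y.set (j+1) (y.getD j 0))
    else (j+1, x, y)

-- loop body for one i: key=x[i]; idx=y[i]; shift; x[j]=key; y[j]=idx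
def pvInsB (st : List Int × List Int) (i : Nat) : List Int × List Int :=
  let key := st.1.getD i 0
  let idx := st.2.getD i 0
  let r := pvShiftB key i st.1 st.2
  (r.2.1.set r.1 key, r.2.2.set r.1 idx)

def sentimentValuePath_alt (array : List Int) : List Int :=
  let x := PySem.List.slice array (some 1) none       -- array[1:]
  let y : List Int := [1,2,3,4,5,6,7]
  -- for i in range(1, len(x)): …  (range(1, n) of Python ints is List.range' 1 (n-1))
  let st := (List.range' 1 (x.length - 1)).foldl pvInsB (x, y)
  0 :: st.2 ++ [0]                                    -- [0] + y + [0]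

-- ===== PRECONDITION & SPEC =====
-- Pre_ excludes arrays of length > 8: there x=array[1:] has more than 7 elements while y has only
-- 7 slots, so both programs raise IndexError (A returns only accidentally when the leading values
-- happen to be already sorted so that no out-of-range swap is attempted; B raises there too).
def Pre_sentimentValuePath (array : List Int) : Prop := array.length ≤ 8
instance (array : List Int) : Decidable (Pre_sentimentValuePath array) := by
  unfold Pre_sentimentValuePath; infer_instance

def pvWitness_sentimentValuePath : List Int := [3, 5, 2, 9, 9, 1]

def Spec_sentimentValuePath (array : List Int) (out : List Int) : Prop := out = sentimentValuePath_alt array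
instance (array : List Int) (out : List Int) : Decidable (Spec_sentimentValuePath array out) := by unfold Spec_sentimentValuePath; infer_instance

-- ===== CLAIM (what is proved, stated in full; the proofs are below) =====
def Claim_equal_sentimentValuePath : Prop := ∀ (array : List Int), Dom_sentimentValuePath array → Pre_sentimentValuePath array → Spec_sentimentValuePath array (sentimentValuePath array)

-- ===== LEMMAS AND PROOFS =====

-- Both sides are lifted to ONE list of (value, index) pairs; each result is shown to be a
-- permutation of the initial pair list that is Pairwise pvR, and such a list is unique.

def pvPSwap (j : Nat) (P : List (Int × Int)) : List (Int × Int) :=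
  (P.set j (P.getD (j+1) (0, 0))).set (j+1) (P.getD j (0, 0))

def pvPStep (P : List (Int × Int)) (j : Nat) : List (Int × Int) :=
  if (P.getD j (0, 0)).1 < (P.getD (j+1) (0, 0)).1 then pvPSwap j P else P

theorem getD_map_fst (P : List (Int × Int)) (j : Nat) :
    (P.map Prod.fst).getD j 0 = (P.getD j (0,0)).1 := List.getD_map P (0,0) Prod.fst
theorem pvPStep_length (P : List (Int × Int)) (j : Nat) : (pvPStep P j).length = P.length := by
  unfold pvPStep pvPSwap; split <;> simp

theorem pvStepA_commute (P : List (Int × Int)) (yt : List Int) (j : Nat) (hj : j + 1 < P.length) :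
    pvStepA (P.map Prod.fst, P.map Prod.snd ++ yt) j
      = ((pvPStep P j).map Prod.fst, (pvPStep P j).map Prod.snd ++ yt) := by
  have hj0 : j < P.length := by omega
  have hm : (P.map Prod.snd).length = P.length := by simp
  unfold pvStepA pvPStep
  simp only [getD_map_fst]
  split
  · unfold pvSwap pvPSwap
    refine Prod.ext ?_ ?_
    · simp [List.map_set, List.getElem?_eq_getElem hj0, List.getElem?_eq_getElem hj]
    · simp only []
      rw [List.getD_append _ _ _ j (by omega), List.getD_append _ _ _ (j+1) (by omega)]
      rw [List.set_append, if_pos (by simp; omega), List.set_append, if_pos (by simp; omega)]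
      simp [List.map_set, List.getElem?_eq_getElem hj0, List.getElem?_eq_getElem hj]
  · rfl

theorem pvFold_commute (js : List Nat) (P : List (Int × Int)) (yt : List Int)
    (h : ∀ j ∈ js, j + 1 < P.length) :
    js.foldl pvStepA (P.map Prod.fst, P.map Prod.snd ++ yt)
      = ((js.foldl pvPStep P).map Prod.fst, (js.foldl pvPStep P).map Prod.snd ++ yt) := by
  induction js generalizing P with
  | nil => rfl
  | cons j js ih =>
    simp only [List.foldl_cons]
    rw [pvStepA_commute P yt j (h j (by simp))]
    exact ih _ (fun a ha => by rw [pvPStep_length]; exact h a (by simp [ha]))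

def pvBPass : Nat → List (Int × Int) → List (Int × Int)
  | 0, l => l
  | _+1, [] => []
  | _+1, [a] => [a]
  | m+1, a :: b :: t => if a.1 < b.1 then b :: pvBPass m (a :: t) else a :: pvBPass m (b :: t)

theorem pvPStep_shift (c : Int × Int) (u : List (Int × Int)) (j : Nat) :
    pvPStep (c :: u) (j + 1) = c :: pvPStep u j := by
  unfold pvPStep pvPSwap
  simp only [List.getD_cons_succ, List.set_cons_succ]
  split <;> rfl

theorem pvFold_shift (js : List Nat) (c : Int × Int) (u : List (Int × Int)) :
    (js.map Nat.succ).foldl pvPStep (c :: u) = c :: js.foldl pvPStep u := by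
  induction js generalizing u with
  | nil => rfl
  | cons j js ih => simp only [List.map_cons, List.foldl_cons, pvPStep_shift]; exact ih _

theorem pvPass_eq_bpass (m : Nat) (P : List (Int × Int)) (hm : m < P.length) :
    (List.range m).foldl pvPStep P = pvBPass m P := by
  induction m generalizing P with
  | zero => cases P <;> rfl
  | succ m ih =>
    match P, hm with
    | a :: b :: t, hm =>
      rw [List.range_succ_eq_map]
      simp only [List.foldl_cons]
      have h0 : pvPStep (a :: b :: t) 0 = if a.1 < b.1 then b :: a :: t else a :: b :: t := by
        unfold pvPStep pvPSwap; rfl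
      rw [h0]
      by_cases hab : a.1 < b.1
      · rw [if_pos hab, pvFold_shift, ih (a :: t) (by simpa using hm)]
        simp [pvBPass, hab]
      · rw [if_neg hab, pvFold_shift, ih (b :: t) (by simpa using hm)]
        simp [pvBPass, hab]

theorem pvBPass_perm (m : Nat) (l : List (Int × Int)) : (pvBPass m l).Perm l := by
  induction m generalizing l with
  | zero => cases l <;> simp [pvBPass]
  | succ m ih =>
    match l with
    | [] => simp [pvBPass]
    | [a] => simp [pvBPass]
    | a :: b :: t =>
      unfold pvBPass
      split
      · exact ((ih (a :: t)).cons b).trans (List.Perm.swap' _ _ (List.Perm.refl t)).symm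
      · exact (ih (b :: t)).cons a

theorem pvBPass_split (m : Nat) (u v : List (Int × Int)) (hu : u.length = m + 1) :
    pvBPass m (u ++ v) = pvBPass m u ++ v := by
  induction m generalizing u with
  | zero =>
    match u, hu with
    | [a], _ => cases v <;> simp [pvBPass]
  | succ m ih =>
    match u, hu with
    | a :: b :: t, hu =>
      show pvBPass (m+1) (a :: b :: (t ++ v)) = pvBPass (m+1) (a :: b :: t) ++ v
      unfold pvBPass
      split
      · rw [List.cons_append, ← ih (a :: t) (by simpa using hu)]; rfl
      · rw [List.cons_append, ← ih (b :: t) (by simpa using hu)]; rfl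

def pvR (p q : Int × Int) : Prop := q.1 < p.1 ∨ (p.1 = q.1 ∧ p.2 < q.2)
def pvTie (l : List (Int × Int)) : Prop := l.Pairwise (fun p q => p.1 = q.1 → p.2 < q.2)

theorem pvTie_cons_head (a b : Int × Int) (t : List (Int × Int)) (h : pvTie (a :: b :: t)) :
    pvTie (a :: t) := List.Pairwise.sublist (List.Sublist.cons₂ a (List.sublist_cons_self b t)) h

theorem pvBPass_tie (m : Nat) (l : List (Int × Int)) (h : pvTie l) : pvTie (pvBPass m l) := by
  induction m generalizing l with
  | zero => cases l <;> simpa [pvBPass] using h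
  | succ m ih =>
    match l with
    | [] => simpa [pvBPass] using h
    | [a] => simpa [pvBPass] using h
    | a :: b :: t =>
      obtain ⟨ha, h2⟩ := List.pairwise_cons.mp h
      obtain ⟨hb, ht⟩ := List.pairwise_cons.mp h2
      simp only [pvBPass]
      split
      · rename_i hab
        rw [pvTie, List.pairwise_cons]
        refine ⟨?_, ih (a :: t) (pvTie_cons_head a b t h)⟩
        intro q hq
        have hq' : q ∈ a :: t := (pvBPass_perm m (a :: t)).mem_iff.mp hq
        rcases List.mem_cons.mp hq' with hq' | hq'
        · subst hq'; intro he; omega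
        · exact hb q hq'
      · rename_i hab
        rw [pvTie, List.pairwise_cons]
        refine ⟨?_, ih (b :: t) h2⟩
        intro q hq
        have hq' : q ∈ b :: t := (pvBPass_perm m (b :: t)).mem_iff.mp hq
        exact ha q hq'

theorem pvBPass_last (m : Nat) (u : List (Int × Int)) (hu : u.length = m + 1) (ht : pvTie u) :
    ∃ w c, pvBPass m u = w ++ [c] ∧ ∀ p ∈ w, pvR p c := by
  induction m generalizing u with
  | zero =>
    match u, hu with
    | [a], _ => exact ⟨[], a, by simp [pvBPass]⟩
  | succ m ih =>
    match u, hu with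
    | a :: b :: t, hu =>
      obtain ⟨ha, h2⟩ := List.pairwise_cons.mp ht
      simp only [pvBPass]
      split
      · rename_i hab
        obtain ⟨w, c, heq, hw⟩ := ih (a :: t) (by simpa using hu) (pvTie_cons_head a b t ht)
        refine ⟨b :: w, c, by simp [heq], ?_⟩
        intro p hp
        rcases List.mem_cons.mp hp with hp | hp
        · subst hp
          have hmem : a ∈ w ++ [c] := by
            rw [← heq]; exact (pvBPass_perm m (a :: t)).mem_iff.mpr List.mem_cons_self
          rcases List.mem_append.mp hmem with hmem | hmem
          · have := hw a hmem
            unfold pvR at this ⊢; omega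
          · have : a = c := by simpa using hmem
            subst this; unfold pvR; omega
        · exact hw p hp
      · rename_i hab
        obtain ⟨w, c, heq, hw⟩ := ih (b :: t) (by simpa using hu) h2
        refine ⟨a :: w, c, by simp [heq], ?_⟩
        intro p hp
        rcases List.mem_cons.mp hp with hp | hp
        · rw [hp]
          have hcmem : c ∈ b :: t := by
            refine (pvBPass_perm m (b :: t)).mem_iff.mp ?_
            rw [heq]; simp
          have hac : a.1 = c.1 → a.2 < c.2 := ha c hcmem
          have hmem : b ∈ w ++ [c] := by
            rw [← heq]; exact (pvBPass_perm m (b :: t)).mem_iff.mpr List.mem_cons_self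
          rcases List.mem_append.mp hmem with hmem | hmem
          · have hbc := hw b hmem
            have hab2 : b.1 = a.1 → a.2 < b.2 := fun h' => ha b List.mem_cons_self h'.symm
            unfold pvR at hbc ⊢
            rcases hbc with h1 | ⟨h1, h2'⟩
            · left; omega
            · by_cases hba : b.1 < a.1
              · left; omega
              · right
                have : a.1 = b.1 := by omega
                exact ⟨by omega, by have := hac (by omega); omega⟩
          · have : b = c := by simpa using hmem
            subst this
            have hab2 : a.1 = b.1 → a.2 < b.2 := ha b List.mem_cons_self
            unfold pvR; by_cases hba : b.1 < a.1
            · left; exact hba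
            · right; exact ⟨by omega, hab2 (by omega)⟩
        · exact hw p hp

theorem pvR_unique (l1 l2 : List (Int × Int)) (hp : l1.Perm l2)
    (h1 : l1.Pairwise pvR) (h2 : l2.Pairwise pvR) : l1 = l2 := by
  refine List.Perm.eq_of_pairwise ?_ h1 h2 hp
  intro a b _ _ hab hba
  unfold pvR at hab hba
  have : a.1 = b.1 ∧ a.2 = b.2 := by omega
  exact Prod.ext this.1 this.2

theorem pvZip_truncate {α β : Type} (x : List α) (y : List β) :
    x.zip y = x.zip (y.take x.length) := by
  induction x generalizing y with
  | nil => simp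
  | cons a x ih =>
    cases y with
    | nil => simp
    | cons b y => simpa using ih y

theorem pvOuter (n k i : Nat) (P : List (Int × Int)) (hn : P.length = n) (hik : i + k = n - 1)
    (ht : pvTie P)
    (hsplit : ∃ u v, P = u ++ v ∧ v.length = i ∧ v.Pairwise pvR ∧ ∀ p ∈ u, ∀ q ∈ v, pvR p q) :
    ((List.range' i k).foldl (fun Q j => pvBPass (n - j - 1) Q) P).Perm P ∧
      ((List.range' i k).foldl (fun Q j => pvBPass (n - j - 1) Q) P).Pairwise pvR := by
  induction k generalizing i P with
  | zero =>
    obtain ⟨u, v, rfl, hv, hvp, hcross⟩ := hsplit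
    refine ⟨List.Perm.refl _, ?_⟩
    have hlen := List.length_append (as := u) (bs := v)
    have hulen : u.length ≤ 1 := by omega
    match u, hulen with
    | [], _ => simpa using hvp
    | [c], _ =>
      simp only [List.singleton_append]
      exact List.pairwise_cons.mpr ⟨fun q hq => hcross c List.mem_cons_self q hq, hvp⟩
  | succ k ih =>
    obtain ⟨u, v, rfl, hv, hvp, hcross⟩ := hsplit
    have hlen := List.length_append (as := u) (bs := v)
    have hulen : u.length = (n - i - 1) + 1 := by omega
    rw [List.range'_succ, List.foldl_cons]
    rw [pvBPass_split _ u v hulen]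
    obtain ⟨w, c, heq, hw⟩ := pvBPass_last _ u hulen
      (List.Pairwise.sublist (List.sublist_append_left u v) ht)
    have hperm : (w ++ [c]).Perm u := heq ▸ pvBPass_perm (n - i - 1) u
    have hmemw : ∀ p ∈ w, p ∈ u := fun p hp => hperm.mem_iff.mp (List.mem_append_left _ hp)
    have hmemc : c ∈ u := hperm.mem_iff.mp (by simp)
    have happ : w ++ [c] ++ v = w ++ (c :: v) := by simp
    rw [heq, happ]
    have htie1 : pvTie (w ++ [c]) :=
      heq ▸ pvBPass_tie (n - i - 1) u (List.Pairwise.sublist (List.sublist_append_left u v) ht)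
    have htie' : pvTie (w ++ (c :: v)) := by
      rw [← happ]
      rw [pvTie, List.pairwise_append]
      rw [pvTie, List.pairwise_append] at ht
      refine ⟨htie1, ht.2.1, ?_⟩
      intro a ha b hb
      refine ht.2.2 a ?_ b hb
      rcases List.mem_append.mp ha with h | h
      · exact hmemw a h
      · simpa [List.eq_of_mem_singleton h] using hmemc
    have hlen' : (w ++ (c :: v)).length = n := by
      have := hperm.length_eq
      simp at this ⊢
      omega
    have hvp' : (c :: v).Pairwise pvR :=
      List.pairwise_cons.mpr ⟨fun q hq => hcross c hmemc q hq, hvp⟩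
    have hcross' : ∀ p ∈ w, ∀ q ∈ c :: v, pvR p q := by
      intro p hp q hq
      rcases List.mem_cons.mp hq with rfl | hq
      · exact hw p hp
      · exact hcross p (hmemw p hp) q hq
    have hres := ih (i + 1) (w ++ (c :: v)) hlen' (by omega) htie'
      ⟨w, c :: v, rfl, by simp [hv], hvp', hcross'⟩
    refine ⟨hres.1.trans ?_, hres.2⟩
    have hp2 : (w ++ [c] ++ v).Perm (u ++ v) := hperm.append_right v
    rw [happ] at hp2
    exact hp2

theorem pvInsert_props (p : Int × Int) (acc : List (Int × Int)) (hs : acc.Pairwise pvR)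
    (hidx : ∀ a ∈ acc, a.2 < p.2) :
    (PySem.List.insertBy (fun a b => decide ((-a.1 : Int) < -b.1)) p acc).Perm (p :: acc) ∧
      (PySem.List.insertBy (fun a b => decide ((-a.1 : Int) < -b.1)) p acc).Pairwise pvR := by
  induction acc with
  | nil =>
    constructor
    · simp [PySem.List.insertBy]
    · simp [PySem.List.insertBy]
  | cons q rest ih =>
    obtain ⟨hq, hrest⟩ := List.pairwise_cons.mp hs
    simp only [PySem.List.insertBy]
    split
    · rename_i hcond
      have hqp : q.1 < p.1 := by simpa using hcond
      constructor
      · exact List.Perm.refl _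
      · refine List.pairwise_cons.mpr ⟨?_, hs⟩
        intro b hb
        rcases List.mem_cons.mp hb with rfl | hb
        · unfold pvR; omega
        · have := hq b hb
          unfold pvR at this ⊢; omega
    · rename_i hcond
      have hpq : p.1 ≤ q.1 := by simp at hcond; omega
      obtain ⟨ihp, ihs⟩ := ih hrest (fun a ha => hidx a (List.mem_cons_of_mem q ha))
      constructor
      · exact (ihp.cons q).trans (List.Perm.swap p q rest)
      · refine List.pairwise_cons.mpr ⟨?_, ihs⟩
        intro b hb
        rcases List.mem_cons.mp (ihp.mem_iff.mp hb) with rfl | hb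
        · unfold pvR
          rcases lt_or_eq_of_le hpq with h | h
          · left; exact h
          · right; exact ⟨h.symm, hidx q List.mem_cons_self⟩
        · exact hq b hb

theorem pvInsFold_props (l acc : List (Int × Int)) (hl : l.Pairwise (fun p q => p.2 < q.2))
    (hs : acc.Pairwise pvR) (hcross : ∀ a ∈ acc, ∀ b ∈ l, a.2 < b.2) :
    (l.foldl (fun acc x => PySem.List.insertBy (fun a b => decide ((-a.1 : Int) < -b.1)) x acc) acc).Perm (l ++ acc) ∧
      (l.foldl (fun acc x => PySem.List.insertBy (fun a b => decide ((-a.1 : Int) < -b.1)) x acc) acc).Pairwise pvR := by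
  induction l generalizing acc with
  | nil => exact ⟨by simp, hs⟩
  | cons p rest ih =>
    obtain ⟨hp, hrest⟩ := List.pairwise_cons.mp hl
    obtain ⟨hip, his⟩ := pvInsert_props p acc hs (fun a ha => hcross a ha p List.mem_cons_self)
    simp only [List.foldl_cons]
    have hcross' : ∀ a ∈ PySem.List.insertBy (fun a b => decide ((-a.1 : Int) < -b.1)) p acc,
        ∀ b ∈ rest, a.2 < b.2 := by
      intro a ha b hb
      rcases List.mem_cons.mp (hip.mem_iff.mp ha) with rfl | ha
      · exact hp b hb
      · exact hcross a ha b (List.mem_cons_of_mem p hb)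
    obtain ⟨h1, h2⟩ := ih _ hrest his hcross'
    refine ⟨h1.trans ?_, h2⟩
    refine (hip.append_left rest).trans ?_
    exact List.perm_middle

-- ---- B side: the index-level shift loop, lifted to pairs ----

def pvPShift (key : Int) : Nat → List (Int × Int) → Nat × List (Int × Int)
  | 0, P => (0, P)
  | j+1, P =>
    if (P.getD j (0,0)).1 < key then pvPShift key j (P.set (j+1) (P.getD j (0,0)))
    else (j+1, P)

def pvPIns (P : List (Int × Int)) (i : Nat) : List (Int × Int) :=
  let p := P.getD i (0,0)
  let r := pvPShift p.1 i P
  r.2.set r.1 p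

theorem pvPShift_le (key : Int) (j : Nat) (P : List (Int × Int)) :
    (pvPShift key j P).1 ≤ j := by
  induction j generalizing P with
  | zero => simp [pvPShift]
  | succ j ih =>
    simp only [pvPShift]
    split
    · exact le_trans (ih _) (by omega)
    · exact le_refl _

theorem pvPShift_length (key : Int) (j : Nat) (P : List (Int × Int)) :
    (pvPShift key j P).2.length = P.length := by
  induction j generalizing P with
  | zero => rfl
  | succ j ih =>
    simp only [pvPShift]
    split
    · rw [ih]; simp
    · rfl

theorem pvPIns_length (P : List (Int × Int)) (i : Nat) : (pvPIns P i).length = P.length := by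
  unfold pvPIns
  simp [pvPShift_length]

theorem pvShiftB_commute (key : Int) (j : Nat) (P : List (Int × Int)) (yt : List Int)
    (hj : j < P.length) :
    pvShiftB key j (P.map Prod.fst) (P.map Prod.snd ++ yt)
      = ((pvPShift key j P).1, (pvPShift key j P).2.map Prod.fst,
         (pvPShift key j P).2.map Prod.snd ++ yt) := by
  induction j generalizing P with
  | zero => rfl
  | succ j ih =>
    have hm : (P.map Prod.snd).length = P.length := by simp
    simp only [pvShiftB, pvPShift, getD_map_fst]
    rw [List.getD_append _ _ _ j (by omega)]
    rw [List.getD_map P (0,0) Prod.snd]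
    split
    · rw [List.set_append, if_pos (by omega)]
      rw [show (P.map Prod.fst).set (j+1) (P.getD j (0,0)).1
            = (P.set (j+1) (P.getD j (0,0))).map Prod.fst from (List.map_set).symm]
      rw [show (P.map Prod.snd).set (j+1) (P.getD j (0,0)).2
            = (P.set (j+1) (P.getD j (0,0))).map Prod.snd from (List.map_set).symm]
      exact ih _ (by simp; omega)
    · rfl

theorem pvInsB_commute (P : List (Int × Int)) (yt : List Int) (i : Nat) (hi : i < P.length) :
    pvInsB (P.map Prod.fst, P.map Prod.snd ++ yt) i
      = ((pvPIns P i).map Prod.fst, (pvPIns P i).map Prod.snd ++ yt) := by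
  unfold pvInsB pvPIns
  simp only [getD_map_fst]
  rw [List.getD_append _ _ _ i (by simp; omega), List.getD_map P (0,0) Prod.snd]
  rw [pvShiftB_commute _ _ _ _ hi]
  have hle : (pvPShift (P.getD i (0,0)).1 i P).1 < P.length :=
    lt_of_le_of_lt (pvPShift_le _ _ _) hi
  have hlen := pvPShift_length (P.getD i (0,0)).1 i P
  refine Prod.ext ?_ ?_
  · simp only []
    rw [show ((pvPShift (P.getD i (0,0)).1 i P).2.map Prod.fst).set
          (pvPShift (P.getD i (0,0)).1 i P).1 (P.getD i (0,0)).1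
        = (((pvPShift (P.getD i (0,0)).1 i P).2).set (pvPShift (P.getD i (0,0)).1 i P).1
            (P.getD i (0,0))).map Prod.fst from (List.map_set).symm]
  · simp only []
    rw [List.set_append, if_pos (by
      rw [List.length_map, pvPShift_length]
      exact lt_of_le_of_lt (pvPShift_le _ _ _) hi)]
    rw [show ((pvPShift (P.getD i (0,0)).1 i P).2.map Prod.snd).set
          (pvPShift (P.getD i (0,0)).1 i P).1 (P.getD i (0,0)).2
        = (((pvPShift (P.getD i (0,0)).1 i P).2).set (pvPShift (P.getD i (0,0)).1 i P).1
            (P.getD i (0,0))).map Prod.snd from (List.map_set).symm]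

theorem pvInsFold_commute (is : List Nat) (P : List (Int × Int)) (yt : List Int)
    (h : ∀ i ∈ is, i < P.length) :
    is.foldl pvInsB (P.map Prod.fst, P.map Prod.snd ++ yt)
      = ((is.foldl pvPIns P).map Prod.fst, (is.foldl pvPIns P).map Prod.snd ++ yt) := by
  induction is generalizing P with
  | nil => rfl
  | cons i is ih =>
    simp only [List.foldl_cons]
    rw [pvInsB_commute P yt i (h i (by simp))]
    exact ih _ (fun a ha => by rw [pvPIns_length]; exact h a (by simp [ha]))

-- inserting before a smaller last element commutes with the append
theorem pvInsertBy_append_last (p q : Int × Int) (w : List (Int × Int)) (hq : q.1 < p.1) :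
    PySem.List.insertBy (fun a b => decide ((-a.1 : Int) < -b.1)) p (w ++ [q])
      = PySem.List.insertBy (fun a b => decide ((-a.1 : Int) < -b.1)) p w ++ [q] := by
  induction w with
  | nil =>
    simp only [List.nil_append, PySem.List.insertBy]
    rw [if_pos (by simp; omega)]
    rfl
  | cons a w ih =>
    simp only [List.cons_append, PySem.List.insertBy]
    split
    · rfl
    · rw [ih]; simp

-- writing at the seam of an append
theorem pvSet_at (u : List (Int × Int)) (d p : Int × Int) (t : List (Int × Int)) :
    (u ++ d :: t).set u.length p = u ++ p :: t := by
  rw [List.set_append, if_neg (by omega)]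
  simp

-- the shift loop followed by the final write IS insertBy into the sorted prefix
theorem pvPShift_insert (p : Int × Int) (u : List (Int × Int)) (d : Int × Int)
    (s v : List (Int × Int)) (hu : u.Pairwise (fun a b => b.1 ≤ a.1))
    (hs : ∀ a ∈ s, a.1 < p.1) :
    (pvPShift p.1 u.length (u ++ (d :: (s ++ v)))).2.set
        (pvPShift p.1 u.length (u ++ (d :: (s ++ v)))).1 p
      = PySem.List.insertBy (fun a b => decide ((-a.1 : Int) < -b.1)) p u ++ (s ++ v) := by
  induction u using List.reverseRecOn generalizing d s with
  | nil => simp [pvPShift, PySem.List.insertBy]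
  | append_singleton w q ih =>
    have hlen : (w ++ [q]).length = w.length + 1 := by simp
    rw [hlen]
    have hget : ((w ++ [q]) ++ (d :: (s ++ v))).getD w.length (0,0) = q := by
      rw [List.getD_append _ _ _ w.length (by simp)]
      rw [List.getD_append_right _ _ _ _ (le_refl w.length)]
      simp
    simp only [pvPShift, hget]
    by_cases hq : q.1 < p.1
    · rw [if_pos hq]
      have hset : (((w ++ [q]) ++ (d :: (s ++ v))).set (w.length + 1) q)
          = w ++ (q :: ((q :: s) ++ v)) := by
        rw [← hlen, pvSet_at]
        simp
      rw [hset]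
      have hw : w.Pairwise (fun a b => b.1 ≤ a.1) :=
        List.Pairwise.sublist (List.sublist_append_left w [q]) hu
      have hrec := ih q (q :: s) hw (by
        intro a ha
        rcases List.mem_cons.mp ha with rfl | ha
        · exact hq
        · exact hs a ha)
      rw [hrec, pvInsertBy_append_last p q w hq]
      simp
    · rw [if_neg hq]
      simp only []
      have hall : ∀ a ∈ w ++ [q], ¬ a.1 < p.1 := by
        intro a ha
        rcases List.mem_append.mp ha with ha | ha
        · have hqa : q.1 ≤ a.1 := (List.pairwise_append.mp hu).2.2 a ha q (by simp)
          omega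
        · have : a = q := by simpa using ha
          subst this; exact hq
      rw [PySem.List.insertBy_of_forall_not_before _ _ _ (by
        intro a ha
        simp only [decide_eq_false_iff_not, not_lt]
        have := hall a ha
        omega)]
      rw [← hlen, pvSet_at]
      simp

-- after the first k iterations the state is (sorted prefix of length k+1) ++ untouched tail
theorem pvPFold_char (P : List (Int × Int)) (htie : P.Pairwise (fun p q => p.2 < q.2))
    (k : Nat) (hk : k ≤ P.length - 1) :
    (List.range' 1 k).foldl pvPIns P
      = (P.take (k+1)).foldl
          (fun acc x => PySem.List.insertBy (fun a b => decide ((-a.1 : Int) < -b.1)) x acc) []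
          ++ P.drop (k+1) := by
  induction k with
  | zero =>
    cases P with
    | nil => rfl
    | cons p t => simp [PySem.List.insertBy]
  | succ k ih =>
    have hk' : k ≤ P.length - 1 := by omega
    have hklt : k + 1 < P.length := by omega
    rw [show List.range' 1 (k+1) = List.range' 1 k ++ [1 + 1 * k] from List.range'_concat,
        List.foldl_append, ih hk']
    simp only [List.foldl_cons, List.foldl_nil]
    set S := (P.take (k+1)).foldl
        (fun acc x => PySem.List.insertBy (fun a b => decide ((-a.1 : Int) < -b.1)) x acc) []
      with hS
    have htake : (P.take (k+1)).Pairwise (fun p q => p.2 < q.2) :=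
      List.Pairwise.sublist (List.take_sublist _ _) htie
    obtain ⟨hSperm, hSpair⟩ := pvInsFold_props (P.take (k+1)) [] htake List.Pairwise.nil (by simp)
    rw [List.append_nil] at hSperm
    have hSlen : S.length = k + 1 := by
      rw [hSperm.length_eq, List.length_take]; omega
    have hdrop : P.drop (k+1) = P[k+1] :: P.drop (k+2) :=
      List.drop_eq_getElem_cons hklt
    have hidx : 1 + 1 * k = k + 1 := by omega
    rw [hidx, hdrop]
    unfold pvPIns
    have hgd : (S ++ P[k+1] :: P.drop (k+2)).getD (k+1) (0,0) = P[k+1] := by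
      rw [List.getD_append_right _ _ _ _ (by omega)]
      simp [hSlen, List.getElem?_eq_getElem hklt]
    rw [hgd]
    have hSfst : S.Pairwise (fun a b => b.1 ≤ a.1) := by
      refine List.Pairwise.imp ?_ hSpair
      intro a b h
      unfold pvR at h; omega
    have := pvPShift_insert P[k+1] S P[k+1] [] (P.drop (k+2)) hSfst (by simp)
    rw [hSlen] at this
    simp only [List.nil_append] at this
    rw [this]
    rw [show P.take (k+1+1) = P.take (k+1) ++ [P[k+1]] from by
      rw [List.take_add_one]; simp [List.getElem?_eq_getElem hklt]]
    rw [List.foldl_append, ← hS]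
    simp only [List.foldl_cons, List.foldl_nil]

theorem pvOuterCommute (n : Nat) (is : List Nat) (P : List (Int × Int)) (yt : List Int)
    (h : ∀ i ∈ is, n - i - 1 < P.length) :
    is.foldl (fun st i => (List.range (n - i - 1)).foldl pvStepA st) (P.map Prod.fst, P.map Prod.snd ++ yt)
      = ((is.foldl (fun Q i => pvBPass (n - i - 1) Q) P).map Prod.fst,
         (is.foldl (fun Q i => pvBPass (n - i - 1) Q) P).map Prod.snd ++ yt) := by
  induction is generalizing P with
  | nil => rfl
  | cons i is ih =>
    simp only [List.foldl_cons]
    have hi := h i (by simp)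
    rw [pvFold_commute (List.range (n - i - 1)) P yt
        (fun j hj => by have := List.mem_range.mp hj; omega)]
    rw [pvPass_eq_bpass (n - i - 1) P hi]
    exact ih (pvBPass (n - i - 1) P) (fun a ha => by
      rw [(pvBPass_perm (n - i - 1) P).length_eq]
      exact h a (by simp [ha]))

-- the central equality: both folds on the pair list, same y-tail
theorem pvMain (x : List Int) (hn : x.length ≤ 7) :
    ((List.range (x.length - 1)).foldl
        (fun st i => (List.range (x.length - i - 1)).foldl pvStepA st) (x, ([1,2,3,4,5,6,7] : List Int))).2
    = ((List.range' 1 (x.length - 1)).foldl pvInsB (x, ([1,2,3,4,5,6,7] : List Int))).2 := by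
  set y : List Int := [1,2,3,4,5,6,7] with hy
  set n := x.length with hnn
  set P₀ := x.zip y with hP0
  have hylen : y.length = 7 := by rw [hy]; rfl
  have hP0len : P₀.length = n := by rw [hP0, List.length_zip]; omega
  have htake : (y.take n).length = n := by rw [List.length_take]; omega
  have hmapfst : P₀.map Prod.fst = x := List.map_fst_zip (by omega)
  have hmapsnd : P₀.map Prod.snd = y.take n := by
    rw [hP0, pvZip_truncate x y, ← hnn]
    exact List.map_snd_zip (by rw [htake])
  have hstate : (x, y) = (P₀.map Prod.fst, P₀.map Prod.snd ++ y.drop n) := by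
    rw [hmapfst, hmapsnd, List.take_append_drop]
  rw [hstate]
  rw [pvOuterCommute n (List.range (n-1)) P₀ (y.drop n)
      (fun i hi => by have := List.mem_range.mp hi; omega)]
  rw [pvInsFold_commute (List.range' 1 (n-1)) P₀ (y.drop n)
      (fun i hi => by have := List.mem_range'_1.mp hi; omega)]
  have htie2 : P₀.Pairwise (fun p q => p.2 < q.2) := by
    have h1 : (y.take n).Pairwise (· < ·) :=
      List.Pairwise.sublist (List.take_sublist n y) (by rw [hy]; decide)
    rw [← hmapsnd] at h1
    exact List.pairwise_map.mp h1
  have htie : pvTie P₀ := by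
    unfold pvTie
    exact List.Pairwise.imp (fun h => fun _ => h) htie2
  -- A side: permutation of P₀, Pairwise pvR
  set Q := (List.range (n-1)).foldl (fun Q i => pvBPass (n - i - 1) Q) P₀ with hQ
  have hQprops := pvOuter n (n-1) 0 P₀ hP0len (by omega) htie
    ⟨P₀, [], by simp, rfl, List.Pairwise.nil, by simp⟩
  rw [List.range_eq_range'] at hQ
  rw [hQ]
  -- B side: the fold is the insertion sort of the whole pair list
  have hBchar := pvPFold_char P₀ htie2 (n-1) (by omega)
  have htakeall : P₀.take (n-1+1) = P₀ := List.take_of_length_le (by omega)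
  have hdropall : P₀.drop (n-1+1) = [] := List.drop_eq_nil_of_le (by omega)
  rw [htakeall, hdropall, List.append_nil] at hBchar
  rw [hBchar]
  obtain ⟨hQperm, hQpair⟩ := hQprops
  obtain ⟨hSperm, hSpair⟩ := pvInsFold_props P₀ [] htie2 List.Pairwise.nil (by simp)
  rw [List.append_nil] at hSperm
  have : (List.range' 0 (n-1)).foldl (fun Q j => pvBPass (n - j - 1) Q) P₀
      = P₀.foldl (fun acc x => PySem.List.insertBy (fun a b => decide ((-a.1 : Int) < -b.1)) x acc) [] :=
    pvR_unique _ _ (hQperm.trans hSperm.symm) hQpair hSpair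
  rw [this]


-- ===== VERDICT (by name: the statement is the Claim_ definition above) =====
theorem sentimentValuePath_spec : Claim_equal_sentimentValuePath := by
  intro array _ hpre
  have hx : (PySem.List.slice array (some 1) none).length ≤ 7 := by
    rw [PySem.List.slice_from array (by norm_num : (0:Int) ≤ 1)]
    unfold Pre_sentimentValuePath at hpre
    simp
    omega
  simp only [Spec_sentimentValuePath, sentimentValuePath, sentimentValuePath_alt]
  rw [pvMain (PySem.List.slice array (some 1) none) hx]
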